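-- pv_equiv track=rewrite | github.com/eedede/Five-in-a-Row | five_in_a_row/fields.py | calc_min_required_moves
-- ===== SOURCE A (Python) =====
-- def calc_min_required_moves( data, pattern, anti_pattern):
--
-- 	count_min = 6
-- 	if len( data) >= 5:
-- 		frames = len(data) - 5
-- 		for w in range(frames+1):
-- 			missing_fields = 0
-- 			for w in data[w:w+5]:
-- 				if w == anti_pattern:
-- 					missing_fields = 6
-- 					break
-- 				elif w == 0:
-- 					missing_fields +=1
-- 			if missing_fields < count_min:
-- 				count_min = missing_fields
--
-- 	return count_min
-- ===== SOURCE B (Python) =====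
-- def calc_min_required_moves(data, pattern, anti_pattern):
--     # prefix counts: pz[i] = zeros in data[:i], pa[i] = anti_pattern occurrences in data[:i]
--     pz = [0]
--     pa = [0]
--     for x in data:
--         pz.append(pz[-1] + (1 if x == 0 else 0))
--         pa.append(pa[-1] + (1 if x == anti_pattern else 0))
--     n = len(data)
--     best = 6
--     if n >= 5:
--         for w in range(n - 4):
--             missing = 6 if pa[w + 5] - pa[w] > 0 else pz[w + 5] - pz[w]
--             if missing < best:
--                 best = missing
--     return best
-- ===== Notes on version B (the rewrite author's own statement) =====
-- stated objective: alternative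
-- what changed: Replaces the per-window inner scan (with early break on anti_pattern) by two prefix-count arrays built in one pass, so each window's value is an O(1) prefix-difference lookup.
import Mathlib
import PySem

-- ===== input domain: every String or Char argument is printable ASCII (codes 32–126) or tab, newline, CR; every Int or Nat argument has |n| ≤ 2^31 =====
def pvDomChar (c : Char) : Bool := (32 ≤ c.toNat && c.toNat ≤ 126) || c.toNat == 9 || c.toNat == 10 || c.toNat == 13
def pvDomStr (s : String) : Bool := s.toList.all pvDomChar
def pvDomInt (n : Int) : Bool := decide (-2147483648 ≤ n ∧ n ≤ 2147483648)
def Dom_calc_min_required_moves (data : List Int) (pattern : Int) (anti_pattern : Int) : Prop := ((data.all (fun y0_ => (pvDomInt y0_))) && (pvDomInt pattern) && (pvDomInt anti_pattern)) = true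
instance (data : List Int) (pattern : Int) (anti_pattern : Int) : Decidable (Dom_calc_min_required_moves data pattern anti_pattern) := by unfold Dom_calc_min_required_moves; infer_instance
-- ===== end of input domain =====

-- B replaces the per-window inner scan by prefix-count arrays (one pass, O(1) per window); same results.

-- ===== PORT A =====
-- inner 'for w in data[w:w+5]' loop with break on anti_pattern
def pvInnerA (anti : Int) : List Int → Int → Int
  | [], acc => acc
  | x :: xs, acc =>
      if x = anti then 6
      else if x = 0 then pvInnerA anti xs (acc + 1)
      else pvInnerA anti xs acc

def calc_min_required_moves (data : List Int) (pattern : Int) (anti_pattern : Int) : Int :=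
  if (data.length : Int) ≥ 5 then
    let frames : Int := (data.length : Int) - 5
    (PySem.List.pyRange 0 (frames + 1) 1).foldl
      (fun count_min w =>
        let missing_fields := pvInnerA anti_pattern (PySem.List.slice data (some w) (some (w + 5))) 0
        if missing_fields < count_min then missing_fields else count_min) 6
  else 6

-- ===== PORT B =====
-- prefix-count list: pvPrefix p xs acc = [acc, acc + count in first 1, …, acc + count in all]
def pvPrefix (p : Int → Bool) : List Int → Int → List Int
  | [], acc => [acc]
  | x :: xs, acc => acc :: pvPrefix p xs (acc + if p x then 1 else 0)

def calc_min_required_moves_alt (data : List Int) (pattern : Int) (anti_pattern : Int) : Int :=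
  let pz := pvPrefix (fun x => x == 0) data 0
  let pa := pvPrefix (fun x => x == anti_pattern) data 0
  let n : Int := (data.length : Int)
  if n ≥ 5 then
    (PySem.List.pyRange 0 (n - 4) 1).foldl
      (fun best w =>
        let missing :=
          if PySem.List.pyGetD pa (w + 5) 0 - PySem.List.pyGetD pa w 0 > 0 then 6
          else PySem.List.pyGetD pz (w + 5) 0 - PySem.List.pyGetD pz w 0
        if missing < best then missing else best) 6
  else 6

-- ===== PRECONDITION & SPEC =====
def Spec_calc_min_required_moves (data : List Int) (pattern : Int) (anti_pattern : Int) (out : Int) : Prop := out = calc_min_required_moves_alt data pattern anti_pattern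
instance (data : List Int) (pattern : Int) (anti_pattern : Int) (out : Int) : Decidable (Spec_calc_min_required_moves data pattern anti_pattern out) := by unfold Spec_calc_min_required_moves; infer_instance

-- ===== CLAIM (what is proved, stated in full; the proofs are below) =====
def Claim_equal_calc_min_required_moves : Prop := ∀ (data : List Int) (pattern : Int) (anti_pattern : Int), Dom_calc_min_required_moves data pattern anti_pattern → Spec_calc_min_required_moves data pattern anti_pattern (calc_min_required_moves data pattern anti_pattern)

-- ===== LEMMAS AND PROOFS =====

-- pvPrefix indexed at i ≤ xs.length gives acc + count of p in xs.take i
theorem pvPrefix_getD (p : Int → Bool) (xs : List Int) (acc : Int) (i : Nat) (hi : i ≤ xs.length) :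
    (pvPrefix p xs acc).getD i 0 = acc + ((xs.take i).countP p : Int) := by
  induction xs generalizing acc i with
  | nil =>
      have h0 : i = 0 := Nat.le_zero.mp hi
      subst h0; simp [pvPrefix]
  | cons x xs ih =>
      cases i with
      | zero => simp [pvPrefix]
      | succ j =>
          simp only [pvPrefix, List.getD_cons_succ, List.take_succ_cons, List.countP_cons]
          rw [ih _ j (by simpa using hi)]
          by_cases hp : p x <;> simp [hp] <;> push_cast <;> ring

-- the inner scan of A: 6 if anti occurs, else acc + number of zeros
theorem pvInnerA_eq (anti : Int) (l : List Int) (acc : Int) :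
    pvInnerA anti l acc = if l.any (fun x => x == anti) then 6 else acc + (l.countP (fun x => x == 0) : Int) := by
  induction l generalizing acc with
  | nil => simp [pvInnerA]
  | cons x xs ih =>
      simp only [pvInnerA, List.any_cons]
      by_cases hx : x = anti
      · simp [hx]
      · by_cases h0 : x = 0
        · rw [if_neg hx, if_pos h0, ih]
          subst h0
          by_cases ha : xs.any (fun y => y == anti)
          · simp [ha]
          · simp [hx, ha]
            push_cast; ring
        · rw [if_neg hx, if_neg h0, ih]
          simp [hx, h0, List.countP_cons]

theorem countP_window (p : Int → Bool) (data : List Int) (w : Nat) :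
    ((data.take (w + 5)).countP p : Int) - ((data.take w).countP p : Int)
      = (((data.drop w).take 5).countP p : Int) := by
  rw [show w + 5 = w + 5 from rfl, List.take_add, List.countP_append]
  push_cast; ring

theorem calc_min_required_moves_spec : Claim_equal_calc_min_required_moves := by
  intro data pattern anti _
  unfold Spec_calc_min_required_moves calc_min_required_moves calc_min_required_moves_alt
  by_cases h5 : (data.length : Int) ≥ 5
  · simp only [h5, if_pos]
    have hrange : ((data.length : Int) - 5) + 1 = (data.length : Int) - 4 := by ring
    rw [hrange]
    apply PySem.List.foldl_congr_mem
    intro acc w hw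
    rw [PySem.List.mem_pyRange_one] at hw
    obtain ⟨hw0, hwlt⟩ := hw
    obtain ⟨k, rfl⟩ : ∃ k : Nat, w = (k : Int) := ⟨w.toNat, (Int.toNat_of_nonneg hw0).symm⟩
    have hkle : k + 5 ≤ data.length := by omega
    have h1 : ((k : Int) + 5) = ((k + 5 : Nat) : Int) := by push_cast; ring
    have hget : ∀ (p : Int → Bool) (i : Nat), i ≤ data.length →
        PySem.List.pyGetD (pvPrefix p data 0) (i : Int) 0 = ((data.take i).countP p : Int) := by
      intro p i hi
      rw [PySem.List.pyGetD_natCast]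
      simpa using pvPrefix_getD p data 0 i hi
    have hslice : PySem.List.slice data (some (k : Int)) (some ((k : Int) + 5)) = (data.drop k).take 5 := by
      rw [h1, PySem.List.slice_natCast]
      congr 1
      omega
    rw [hslice, pvInnerA_eq, h1, hget _ _ hkle, hget _ _ hkle,
        hget _ _ (by omega), hget _ _ (by omega), countP_window, countP_window]
    by_cases hm : anti ∈ (data.drop k).take 5
    · have hc : ((data.drop k).take 5).any (fun x => x == anti) = true := by
        rw [List.any_eq_true]; exact ⟨anti, hm, by simp⟩
      simp [hc, hm]
    · have hc : ((data.drop k).take 5).any (fun x => x == anti) = false := by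
        rw [List.any_eq_false]; intro a ha
        simp only [beq_iff_eq]; intro hpa; exact hm (hpa ▸ ha)
      simp [hc, hm]
  · simp [h5]
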